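-- pv_equiv track=rewrite | github.com/lrodriolivera/centinela | src/centinela/gateway/streaming.py | sse_encode
-- ===== SOURCE A (Python) =====
-- def sse_encode(data: str, event: str | None = None) -> str:
--     """Encode a Server-Sent Events message."""
--     lines = []
--     if event:
--         lines.append(f"event: {event}")
--     for line in data.split("\n"):
--         lines.append(f"data: {line}")
--     lines.append("")  # Trailing newline
--     return "\n".join(lines) + "\n"
-- ===== SOURCE B (Python) =====
-- def sse_encode(data: str, event: str | None = None) -> str:
--     prefix = f"event: {event}\n" if event else ""
--     return prefix + "data: " + data.replace("\n", "\ndata: ") + "\n\n"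
-- ===== Notes on version B (the rewrite author's own statement) =====
-- stated objective: idiomatic
-- what changed: Replaced the list-accumulate/split/loop/join pipeline with an optional event prefix concatenated with a single replace of each newline by a newline plus the data field marker.
import Mathlib
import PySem

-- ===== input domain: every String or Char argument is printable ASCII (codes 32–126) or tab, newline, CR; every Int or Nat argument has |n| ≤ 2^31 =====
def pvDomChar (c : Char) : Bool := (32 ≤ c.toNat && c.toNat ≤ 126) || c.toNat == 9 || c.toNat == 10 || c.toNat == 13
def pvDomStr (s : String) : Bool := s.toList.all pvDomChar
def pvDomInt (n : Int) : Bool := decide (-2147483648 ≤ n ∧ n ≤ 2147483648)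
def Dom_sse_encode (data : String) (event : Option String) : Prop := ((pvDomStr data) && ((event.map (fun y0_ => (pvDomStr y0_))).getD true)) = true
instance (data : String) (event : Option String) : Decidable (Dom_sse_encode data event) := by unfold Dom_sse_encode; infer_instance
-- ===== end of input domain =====

-- B replaces A's list-accumulate / split / loop / join pipeline by an optional event prefix
-- plus one data.replace("\n", "\ndata: ") transformation (idiomatic; return value only, no mutation).

-- ===== PORT A =====
def sse_encode (data : String) (event : Option String) : String :=
  let lines0 : List (List Char) :=
    match event with
    | some e => if e.toList ≠ [] then [("event: ".toList ++ e.toList)] else []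
    | none => []
  let lines1 := (PySem.Chars.splitOn data.toList ['\n']).foldl
      (fun acc line => acc ++ ["data: ".toList ++ line]) lines0
  let lines2 := lines1 ++ [[]]
  String.ofList (PySem.Chars.join ['\n'] lines2 ++ ['\n'])

-- ===== PORT B =====
def sse_encode_alt (data : String) (event : Option String) : String :=
  let pre : List Char :=
    match event with
    | some e => if e.toList ≠ [] then "event: ".toList ++ e.toList ++ ['\n'] else []
    | none => []
  String.ofList (pre ++ "data: ".toList ++
    PySem.Chars.replace data.toList ['\n'] ('\n' :: "data: ".toList) ++ ['\n', '\n'])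

-- ===== PRECONDITION & SPEC =====
def Spec_sse_encode (data : String) (event : Option String) (out : String) : Prop := out = sse_encode_alt data event
instance (data : String) (event : Option String) (out : String) : Decidable (Spec_sse_encode data event out) := by unfold Spec_sse_encode; infer_instance

-- ===== CLAIM (what is proved, stated in full; the proofs are below) =====
def Claim_equal_sse_encode : Prop := ∀ (data : String) (event : Option String), Dom_sse_encode data event → Spec_sse_encode data event (sse_encode data event)

-- ===== LEMMAS AND PROOFS =====

/-- data.split("\n") in direct structural form. -/
def mySplit : List Char → List (List Char)
  | [] => [[]]
  | c :: t => if c = '\n' then [] :: mySplit t else (mySplit t).modifyHead (c :: ·)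

/-- data.replace("\n", new) in direct structural form. -/
def myRep (new : List Char) : List Char → List Char
  | [] => []
  | c :: t => if c = '\n' then new ++ myRep new t else c :: myRep new t

theorem mySplit_ne_nil (l : List Char) : mySplit l ≠ [] := by
  cases l with
  | nil => simp [mySplit]
  | cons c t =>
    simp only [mySplit]
    split_ifs
    · simp
    · cases h : mySplit t with
      | nil => exact absurd h (mySplit_ne_nil t)
      | cons a b => simp

theorem splitOn_go_eq (fuel : Nat) (l cur : List Char) (acc : List (List Char))
    (h : l.length ≤ fuel) :
    PySem.Chars.splitOn.go ['\n'] fuel l cur acc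
      = acc.reverse ++ (mySplit l).modifyHead (cur.reverse ++ ·) := by
  induction fuel generalizing l cur acc with
  | zero =>
    have : l = [] := by
      cases l with
      | nil => rfl
      | cons a b => simp at h
    subst this
    simp [PySem.Chars.splitOn.go, mySplit]
  | succ n ih =>
    cases l with
    | nil => simp [PySem.Chars.splitOn.go, mySplit]
    | cons c rest =>
      simp only [PySem.Chars.splitOn.go, List.isPrefixOf]
      by_cases hc : c = '\n'
      · subst hc
        simp only [beq_self_eq_true, Bool.true_and, if_pos]
        rw [ih (List.drop (['\n'].length) ('\n' :: rest)) [] (cur.reverse :: acc)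
          (by simpa using Nat.le_of_succ_le_succ h)]
        simp only [mySplit]
        cases h2 : mySplit rest with
        | nil => simp [h2]
        | cons a b => simp [h2]
      · rw [if_neg (by simp [Ne.symm hc])]
        rw [ih rest (c :: cur) acc (by simpa using Nat.le_of_succ_le_succ h)]
        simp only [mySplit, if_neg hc, List.reverse_cons]
        cases h2 : mySplit rest with
        | nil => simp
        | cons a b => simp

theorem splitOn_eq (cs : List Char) :
    PySem.Chars.splitOn cs ['\n'] = mySplit cs := by
  unfold PySem.Chars.splitOn
  rw [splitOn_go_eq (cs.length + 1) cs [] [] (by omega)]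
  cases h : mySplit cs with
  | nil => simp
  | cons a b => simp

theorem rep_go_eq (new : List Char) (fuel : Nat) (l acc : List Char)
    (h : l.length ≤ fuel) :
    PySem.Chars.replace.go ['\n'] new fuel l acc = acc.reverse ++ myRep new l := by
  induction fuel generalizing l acc with
  | zero =>
    have : l = [] := by
      cases l with
      | nil => rfl
      | cons a b => simp at h
    subst this
    simp [PySem.Chars.replace.go, myRep]
  | succ n ih =>
    cases l with
    | nil => simp [PySem.Chars.replace.go, myRep]
    | cons c rest =>
      simp only [PySem.Chars.replace.go, List.isPrefixOf]
      by_cases hc : c = '\n'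
      · subst hc
        simp only [beq_self_eq_true, Bool.true_and, if_pos]
        rw [ih (List.drop (['\n'].length) ('\n' :: rest)) (new.reverse ++ acc)
          (by simpa using Nat.le_of_succ_le_succ h)]
        simp [myRep]
      · rw [if_neg (by simp [Ne.symm hc])]
        rw [ih rest (c :: acc) (by simpa using Nat.le_of_succ_le_succ h)]
        simp [myRep, hc]

theorem replace_eq (cs new : List Char) :
    PySem.Chars.replace cs ['\n'] new = myRep new cs := by
  unfold PySem.Chars.replace
  rw [if_neg (by simp)]
  simpa using rep_go_eq new cs.length cs [] (by omega)

theorem join_cons_ne (sep a : List Char) (L : List (List Char)) (h : L ≠ []) :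
    PySem.Chars.join sep (a :: L) = a ++ sep ++ PySem.Chars.join sep L := by
  cases L with
  | nil => exact absurd rfl h
  | cons b r => rw [PySem.Chars.join_cons_cons]

theorem join_split (pre cs : List Char) :
    PySem.Chars.join ('\n' :: pre) (mySplit cs) = myRep ('\n' :: pre) cs := by
  induction cs with
  | nil => simp [mySplit, myRep, PySem.Chars.join_singleton]
  | cons c t ih =>
    by_cases hc : c = '\n'
    · subst hc
      rw [show mySplit ('\n' :: t) = [] :: mySplit t from by simp [mySplit],
        show myRep ('\n' :: pre) ('\n' :: t) = ('\n' :: pre) ++ myRep ('\n' :: pre) t from by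
          simp [myRep],
        join_cons_ne _ _ _ (mySplit_ne_nil t), ih]
      simp
    · simp only [mySplit, if_neg hc, myRep]
      cases h2 : mySplit t with
      | nil => exact absurd h2 (mySplit_ne_nil t)
      | cons a b =>
        rw [h2] at ih
        cases b with
        | nil =>
          simp only [List.modifyHead, PySem.Chars.join_singleton] at ih ⊢
          simp [ih]
        | cons b0 br =>
          simp only [List.modifyHead, PySem.Chars.join_cons_cons] at ih ⊢
          simp [ih]

theorem join_map (pre : List Char) (parts : List (List Char)) (h : parts ≠ []) :
    PySem.Chars.join ['\n'] (parts.map (pre ++ ·))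
      = pre ++ PySem.Chars.join ('\n' :: pre) parts := by
  induction parts with
  | nil => exact absurd rfl h
  | cons p rest ih =>
    cases rest with
    | nil => simp [PySem.Chars.join_singleton]
    | cons q r =>
      simp only [List.map_cons]
      have ih' := ih (by simp)
      simp only [List.map_cons] at ih'
      rw [PySem.Chars.join_cons_cons, PySem.Chars.join_cons_cons, ih']
      simp

theorem join_append_nil (sep : List Char) (M : List (List Char)) (h : M ≠ []) :
    PySem.Chars.join sep (M ++ [[]]) = PySem.Chars.join sep M ++ sep := by
  induction M with
  | nil => exact absurd rfl h
  | cons p rest ih =>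
    cases rest with
    | nil => simp [PySem.Chars.join_cons_cons, PySem.Chars.join_singleton]
    | cons q r =>
      rw [List.cons_append, join_cons_ne _ _ _ (by simp),
        PySem.Chars.join_cons_cons, ih (by simp)]
      simp

theorem key_lemma (cs : List Char) :
    PySem.Chars.join ['\n'] ((mySplit cs).map ("data: ".toList ++ ·) ++ [[]]) ++ ['\n']
      = "data: ".toList ++ myRep ('\n' :: "data: ".toList) cs ++ ['\n', '\n'] := by
  rw [join_append_nil _ _ (by simp [mySplit_ne_nil cs]),
    join_map _ _ (by simp [mySplit_ne_nil cs]), join_split]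
  simp

-- ===== VERDICT (by name: the statement is the Claim_ definition above) =====
theorem sse_encode_spec : Claim_equal_sse_encode := by
  intro data event _
  unfold Spec_sse_encode sse_encode sse_encode_alt
  simp only []
  congr 1
  rw [PySem.List.foldl_append_singleton_eq_map, splitOn_eq, replace_eq]
  cases event with
  | none => simpa using key_lemma data.toList
  | some e =>
    dsimp only
    by_cases he : e.toList = []
    · rw [if_neg (by simp [he]), if_neg (by simp [he])]
      simpa using key_lemma data.toList
    · rw [if_pos he, if_pos he]
      simp only [List.cons_append, List.nil_append, List.append_assoc]
      rw [join_cons_ne _ _ _ (by simp)]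
      have hk := key_lemma data.toList
      simp only [List.append_assoc] at hk ⊢
      rw [hk]
      simp
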